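-- pv_equiv track=rewrite | github.com/andrejPP/MTCNN-detekcia-znaciek | datasets_wrapper.py | germ_super_class
-- ===== SOURCE A (Python) =====
-- def germ_super_class(class_num: int):
--     """
--     For GTSDB dataset get super class of class specified by parameter class_num.
--     Super classes are different shapes of signs.
--
--     Args:
--         class_num: class index
--     Return:
--         Index of super class.
--     """
--
--     super_class = {
--         # Classes with shape of circle.
--         0: [0, 1, 2, 3, 4, 5, 6, 7, 8, 9, 10, 15, 16, 17, 32, 33, 34, 35, 36, 37, 38, 39, 40, 41, 42],
--         # Classes with shape of triangle.
--         1: [11, 18, 19, 20, 21, 22, 23, 24, 25, 26, 27, 28, 29, 30, 31],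
--         2: [12],  # Class shaped as diamond.
--         3: [13],  # Class shaped as verticali flipped triangle.
--         4: [14],  # Class shaped as octagon.
--     }
--     for super_c, classes in super_class.items():
--         if class_num in classes:
--             return super_c
--
--     raise RuntimeError("Super class for class{} not found.".format(class_num))
-- ===== SOURCE B (Python) =====
-- def germ_super_class(class_num: int):
--     # Closed-form range arithmetic instead of scanning lists in a dict.
--     if 0 <= class_num <= 10 or 15 <= class_num <= 17 or 32 <= class_num <= 42:
--         return 0
--     if class_num == 11 or 18 <= class_num <= 31:
--         return 1
--     if 12 <= class_num <= 14:
--         return class_num - 10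
--     raise RuntimeError("Super class for class{} not found.".format(class_num))
-- ===== Notes on version B (the rewrite author's own statement) =====
-- stated objective: simpler
-- what changed: Replaces the dict-of-lists with membership scans by a closed-form chain of range comparisons (12..14 map arithmetically to class_num-10).
import Mathlib
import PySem

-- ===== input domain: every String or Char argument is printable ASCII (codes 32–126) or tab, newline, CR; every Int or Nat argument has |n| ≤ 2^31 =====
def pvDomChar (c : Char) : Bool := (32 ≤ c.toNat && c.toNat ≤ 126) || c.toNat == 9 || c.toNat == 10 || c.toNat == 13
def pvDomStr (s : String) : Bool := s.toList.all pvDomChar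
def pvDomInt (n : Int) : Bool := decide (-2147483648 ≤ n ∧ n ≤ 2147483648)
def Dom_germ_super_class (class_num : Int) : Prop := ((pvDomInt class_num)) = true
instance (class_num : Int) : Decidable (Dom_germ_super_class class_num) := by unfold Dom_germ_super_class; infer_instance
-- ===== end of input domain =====

-- B replaces A's dict-of-lists scan by a closed-form chain of range comparisons (simpler).
-- Where A raises RuntimeError (class_num outside 0..42) B raises the same error; Pre_ excludes those inputs.

-- ===== PORT A =====
-- A's dict literal: super class index -> list of class indices (insertion order).
def germSuperTable : List (Int × List Int) :=
  [(0, [0, 1, 2, 3, 4, 5, 6, 7, 8, 9, 10, 15, 16, 17, 32, 33, 34, 35, 36, 37, 38, 39, 40, 41, 42]),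
   (1, [11, 18, 19, 20, 21, 22, 23, 24, 25, 26, 27, 28, 29, 30, 31]),
   (2, [12]), (3, [13]), (4, [14])]

-- the for-loop: first (super_c, classes) with class_num ∈ classes; none = the raise path (excluded by Pre_)
def germLoop (class_num : Int) : List (Int × List Int) → Option Int
  | [] => none
  | (super_c, classes) :: rest =>
      if classes.contains class_num then some super_c else germLoop class_num rest

def germ_super_class (class_num : Int) : Int :=
  (germLoop class_num germSuperTable).getD 0

-- ===== PORT B =====
def germ_super_class_alt (class_num : Int) : Int :=
  if (0 ≤ class_num ∧ class_num ≤ 10) ∨ (15 ≤ class_num ∧ class_num ≤ 17) ∨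
     (32 ≤ class_num ∧ class_num ≤ 42) then 0
  else if class_num = 11 ∨ (18 ≤ class_num ∧ class_num ≤ 31) then 1
  else if 12 ≤ class_num ∧ class_num ≤ 14 then class_num - 10
  else 0  -- raise path, excluded by Pre_

-- ===== PRECONDITION & SPEC =====
-- Pre_ excludes exactly the inputs on which A (and B) raise RuntimeError: class indices outside 0..42.
def Pre_germ_super_class (class_num : Int) : Prop := 0 ≤ class_num ∧ class_num ≤ 42
instance (class_num : Int) : Decidable (Pre_germ_super_class class_num) := by unfold Pre_germ_super_class; infer_instance
def pvWitness_germ_super_class : Int := (13)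

def Spec_germ_super_class (class_num : Int) (out : Int) : Prop := out = germ_super_class_alt class_num
instance (class_num : Int) (out : Int) : Decidable (Spec_germ_super_class class_num out) := by unfold Spec_germ_super_class; infer_instance

-- ===== CLAIM (what is proved, stated in full; the proofs are below) =====
def Claim_equal_germ_super_class : Prop := ∀ (class_num : Int), Dom_germ_super_class class_num → Pre_germ_super_class class_num → Spec_germ_super_class class_num (germ_super_class class_num)

-- ===== LEMMAS AND PROOFS =====

-- ===== VERDICT (by name: the statement is the Claim_ definition above) =====
theorem germ_super_class_spec : Claim_equal_germ_super_class := by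
  intro n _ hpre
  obtain ⟨h0, h1⟩ := hpre
  unfold Spec_germ_super_class
  interval_cases n <;> decide
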